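-- pv_equiv track=rewrite | github.com/ChenhaoZhang01/OPALS_Group19 | projects/paper2/analysis/prepare_card_benchmark_data.py | extract_aro_id
-- ===== SOURCE A (Python) =====
-- def extract_aro_id(header: str) -> str | None:
--     marker = "ARO:"
--     idx = header.find(marker)
--     if idx < 0:
--         return None
--     end = idx + len(marker)
--     while end < len(header) and header[end].isdigit():
--         end += 1
--     aro = header[idx:end]
--     if aro == marker:
--         return None
--     return aro
-- ===== SOURCE B (Python) =====
-- def extract_aro_id(header: str) -> str | None:
--     # Single-pass state machine: states 0..3 = chars of "ARO:" matched so far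
--     # (KMP-style restart on 'A'), state 4 = collecting digits after the marker.
--     state = 0
--     digits = []
--     for c in header:
--         if state < 4:
--             if c == "ARO:"[state]:
--                 state += 1
--             elif c == "A":
--                 state = 1
--             else:
--                 state = 0
--         elif c.isdigit():
--             digits.append(c)
--         else:
--             break
--     if state < 4 or not digits:
--         return None
--     return "ARO:" + "".join(digits)
-- ===== Notes on version B (the rewrite author's own statement) =====
-- stated objective: alternative
-- what changed: Replaces find-the-marker-then-walk-indices with a single left-to-right pass: a KMP-style 5-state automaton over the characters that matches the marker pattern (restarting on its first letter) and then accumulates the trailing digits, with no index arithmetic or substring search.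
import Mathlib
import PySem

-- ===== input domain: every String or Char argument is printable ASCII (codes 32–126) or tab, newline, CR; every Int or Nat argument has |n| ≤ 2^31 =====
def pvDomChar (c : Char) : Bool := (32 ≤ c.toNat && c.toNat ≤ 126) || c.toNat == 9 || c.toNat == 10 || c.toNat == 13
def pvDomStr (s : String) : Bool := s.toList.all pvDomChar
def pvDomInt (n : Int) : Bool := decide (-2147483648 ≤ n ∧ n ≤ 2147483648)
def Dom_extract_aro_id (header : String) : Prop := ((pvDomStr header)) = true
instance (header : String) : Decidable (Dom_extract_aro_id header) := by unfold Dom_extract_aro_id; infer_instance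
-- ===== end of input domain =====

-- B replaces A's find-the-marker + index-walking loop by a single left-to-right pass with a
-- KMP-style 5-state automaton that matches "ARO:" and then collects the trailing digits
-- (alternative decomposition; same cost; return value only, nothing is mutated).

-- ===== PORT A =====
-- the `while end < len(header) and header[end].isdigit(): end += 1` loop, step for step
-- (header[end] is a checked in-range index here, so the direct getElem is exact)
def aroWhileEnd (cs : List Char) (e : Nat) : Nat :=
  if h : e < cs.length then
    if PySem.Chars.isdigit cs[e] then aroWhileEnd cs (e + 1) else e
  else e
termination_by cs.length - e

def extract_aro_id (header : String) : Option String :=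
  let marker := "ARO:".toList
  let cs := header.toList
  let idx := PySem.Chars.find cs marker
  if idx < 0 then none
  else
    let e := aroWhileEnd cs (idx.toNat + marker.length)
    let aro := PySem.Chars.slice cs (some idx) (some (e : Int))
    if aro = marker then none else some (String.ofList aro)

-- ===== PORT B =====
-- the `if c == "ARO:"[state] … elif c == "A" … else …` transition of Source B's for-loop body
def altStep (st : Nat) (c : Char) : Nat :=
  if c = ("ARO:".toList)[st]! then st + 1 else if c = 'A' then 1 else 0

-- Source B's for-loop over the characters: state < 4 = matching phase, 4 = digit collection,
-- `break` on the first non-digit in state 4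
def altLoop : List Char → Nat → List Char → Nat × List Char
  | [], st, ds => (st, ds)
  | c :: cs, st, ds =>
    if st < 4 then altLoop cs (altStep st c) ds
    else if PySem.Chars.isdigit c then altLoop cs st (ds ++ [c])
    else (st, ds)

def extract_aro_id_alt (header : String) : Option String :=
  let r := altLoop header.toList 0 []
  if r.1 < 4 ∨ r.2 = [] then none
  else some (String.ofList ("ARO:".toList ++ r.2))

-- ===== PRECONDITION & SPEC =====
def Spec_extract_aro_id (header : String) (out : Option String) : Prop := out = extract_aro_id_alt header
instance (header : String) (out : Option String) : Decidable (Spec_extract_aro_id header out) := by unfold Spec_extract_aro_id; infer_instance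

-- ===== CLAIM (what is proved, stated in full; the proofs are below) =====
def Claim_equal_extract_aro_id : Prop := ∀ (header : String), Dom_extract_aro_id header → Spec_extract_aro_id header (extract_aro_id header)

-- ===== LEMMAS AND PROOFS =====

-- characterisation of A's while loop
lemma aroWhileEnd_eq (cs : List Char) (e : Nat) :
    aroWhileEnd cs e = e + ((cs.drop e).takeWhile PySem.Chars.isdigit).length := by
  by_cases h : e < cs.length
  · have hdrop : cs.drop e = cs[e] :: cs.drop (e + 1) := List.drop_eq_getElem_cons h
    rw [aroWhileEnd, dif_pos h]
    by_cases hd : PySem.Chars.isdigit cs[e] = true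
    · rw [if_pos hd, aroWhileEnd_eq cs (e + 1), hdrop, List.takeWhile_cons_of_pos hd,
        List.length_cons]
      omega
    · rw [if_neg hd, hdrop, List.takeWhile_cons_of_neg (by simpa using hd)]
      simp
  · rw [aroWhileEnd, dif_neg h]
    have hnil : cs.drop e = [] := List.drop_eq_nil_of_le (by omega)
    simp [hnil]
termination_by cs.length - e

-- the state of the automaton after consuming p: the longest suffix of p that is a
-- proper prefix of "ARO:" (the branches are mutually exclusive, see lastChar_of_suffix)
def mstate (p : List Char) : Nat :=
  if ['A','R','O'] <:+ p then 3 else if ['A','R'] <:+ p then 2 else if ['A'] <:+ p then 1 else 0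

lemma mstate_lt (p : List Char) : mstate p < 4 := by
  unfold mstate; split_ifs <;> omega

lemma suffix_concat_iff (l p : List Char) (c c' : Char) :
    (l ++ [c]) <:+ (p ++ [c']) ↔ c = c' ∧ l <:+ p := by
  rw [← List.reverse_prefix]
  simp [List.cons_prefix_cons]

lemma sufA (p : List Char) (c : Char) : (['A'] <:+ p ++ [c]) ↔ c = 'A' := by
  have := suffix_concat_iff [] p 'A' c
  simpa [eq_comm] using this

lemma sufAR (p : List Char) (c : Char) : (['A','R'] <:+ p ++ [c]) ↔ c = 'R' ∧ ['A'] <:+ p := by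
  have := suffix_concat_iff ['A'] p 'R' c
  simpa [eq_comm] using this

lemma sufARO (p : List Char) (c : Char) : (['A','R','O'] <:+ p ++ [c]) ↔ c = 'O' ∧ ['A','R'] <:+ p := by
  have := suffix_concat_iff ['A','R'] p 'O' c
  simpa [eq_comm] using this

lemma sufMarker (p : List Char) (c : Char) :
    (['A','R','O',':'] <:+ p ++ [c]) ↔ c = ':' ∧ ['A','R','O'] <:+ p := by
  have := suffix_concat_iff ['A','R','O'] p ':' c
  simpa [eq_comm] using this

lemma lastChar_of_suffix {l p : List Char} {c : Char} (h : (l ++ [c]) <:+ p) :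
    p.getLast? = some c := by
  obtain ⟨t, rfl⟩ := h
  rw [← List.append_assoc]
  simp

lemma not_AR_of_ARO {p : List Char} (h : ['A','R','O'] <:+ p) : ¬ ['A','R'] <:+ p := by
  intro h2
  have hO := lastChar_of_suffix (l := ['A','R']) (c := 'O') h
  have hR := lastChar_of_suffix (l := ['A']) (c := 'R') h2
  rw [hO] at hR; exact absurd (Option.some.inj hR) (by decide)

lemma not_A_of_ARO {p : List Char} (h : ['A','R','O'] <:+ p) : ¬ ['A'] <:+ p := by
  intro h1
  have hO := lastChar_of_suffix (l := ['A','R']) (c := 'O') h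
  have hA := lastChar_of_suffix (l := []) (c := 'A') h1
  rw [hO] at hA; exact absurd (Option.some.inj hA) (by decide)

lemma not_A_of_AR {p : List Char} (h : ['A','R'] <:+ p) : ¬ ['A'] <:+ p := by
  intro h1
  have hR := lastChar_of_suffix (l := ['A']) (c := 'R') h
  have hA := lastChar_of_suffix (l := []) (c := 'A') h1
  rw [hR] at hA; exact absurd (Option.some.inj hA) (by decide)

lemma marker_toList : "ARO:".toList = ['A','R','O',':'] := by decide

-- the transition computes the next state: completion of the marker …
lemma step_complete (p : List Char) (c : Char) (h : ['A','R','O',':'] <:+ p ++ [c]) :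
    altStep (mstate p) c = 4 := by
  obtain ⟨hc, h3⟩ := (sufMarker p c).mp h
  subst hc
  rw [mstate, if_pos h3]
  decide

-- … and otherwise the KMP invariant: the new state is the state of the extended prefix
lemma step_eq (p : List Char) (c : Char) (h : ¬ ['A','R','O',':'] <:+ p ++ [c]) :
    altStep (mstate p) c = mstate (p ++ [c]) := by
  by_cases h3 : ['A','R','O'] <:+ p
  · have h2 := not_AR_of_ARO h3
    have h1 := not_A_of_ARO h3
    have hc : ¬ c = ':' := fun hc => h ((sufMarker p c).mpr ⟨hc, h3⟩)
    simp [mstate, altStep, sufARO, sufAR, sufA, h3, h2, h1, hc, marker_toList]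
  · by_cases h2 : ['A','R'] <:+ p
    · have h1 := not_A_of_AR h2
      simp [mstate, altStep, sufARO, sufAR, sufA, h3, h2, h1, marker_toList]
    · by_cases h1 : ['A'] <:+ p
      · simp [mstate, altStep, sufARO, sufAR, sufA, h3, h2, h1, marker_toList]
      · simp [mstate, altStep, sufARO, sufAR, sufA, h3, h2, h1, marker_toList]

-- digit-collection phase of Source B's loop
lemma altLoop_digits (cs ds : List Char) :
    altLoop cs 4 ds = (4, ds ++ cs.takeWhile PySem.Chars.isdigit) := by
  induction cs generalizing ds with
  | nil => simp [altLoop]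
  | cons c cs ih =>
    by_cases hd : PySem.Chars.isdigit c
    · rw [altLoop, if_neg (by omega), if_pos hd, ih, List.takeWhile_cons_of_pos hd]
      simp
    · rw [altLoop, if_neg (by omega), if_neg hd, List.takeWhile_cons_of_neg (by simpa using hd)]
      simp

-- matching phase, no occurrence of the marker anywhere: state never reaches 4
lemma altLoop_noOcc (cs : List Char) (p ds : List Char)
    (h : ∀ i ≤ cs.length, ¬ ['A','R','O',':'] <:+ p ++ cs.take i) :
    altLoop cs (mstate p) ds = (mstate (p ++ cs), ds) := by
  induction cs generalizing p with
  | nil => simp [altLoop]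
  | cons c cs ih =>
    rw [altLoop, if_pos (mstate_lt p)]
    have h1 : ¬ ['A','R','O',':'] <:+ p ++ [c] := by
      have := h 1 (by simp)
      simpa using this
    rw [step_eq p c h1, ih (p ++ [c]) (fun i hi => by
      have := h (i + 1) (by simpa using hi)
      simpa using this)]
    simp

-- matching phase, first occurrence of the marker ends after i consumed characters
lemma altLoop_occ (cs : List Char) (p ds : List Char) (i : Nat)
    (hi1 : 1 ≤ i) (hile : i ≤ cs.length)
    (hocc : ['A','R','O',':'] <:+ p ++ cs.take i)
    (hmin : ∀ j < i, ¬ ['A','R','O',':'] <:+ p ++ cs.take j) :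
    altLoop cs (mstate p) ds = altLoop (cs.drop i) 4 ds := by
  induction cs generalizing p i with
  | nil => simp at hile; omega
  | cons c cs ih =>
    rw [altLoop, if_pos (mstate_lt p)]
    rcases i with _ | i
    · omega
    rcases i with _ | i
    · have : ['A','R','O',':'] <:+ p ++ [c] := by simpa using hocc
      rw [step_complete p c this]
      simp
    · have h1 : ¬ ['A','R','O',':'] <:+ p ++ [c] := by
        have := hmin 1 (by omega)
        simpa using this
      rw [step_eq p c h1,
        ih (p ++ [c]) (i + 1) (by omega) (by simpa using hile)
          (by simpa using hocc)
          (fun j hj => by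
            have := hmin (j + 1) (by omega)
            simpa using this)]
      simp

-- occurrence of the marker as a prefix of a drop ↔ as a suffix of a take
lemma suffix_of_eq_len (a X l : List Char) (hlen : X.length = l.length) :
    l <:+ a ++ X ↔ X = l := by
  constructor
  · rintro ⟨t, ht⟩
    have hl : t.length = a.length := by
      have := congrArg List.length ht; simp at this; omega
    exact ((List.append_inj ht hl).2).symm
  · rintro rfl; exact ⟨a, rfl⟩

lemma occ_iff (cs : List Char) (j : Nat) (hj : j + 4 ≤ cs.length) :
    (['A','R','O',':'] <+: cs.drop j) ↔ ['A','R','O',':'] <:+ cs.take (j + 4) := by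
  have htake : cs.take (j + 4) = cs.take j ++ (cs.drop j).take 4 := List.take_add
  have hXlen : ((cs.drop j).take 4).length = 4 := by simp; omega
  rw [htake, suffix_of_eq_len _ _ _ (by rw [hXlen]; rfl)]
  rw [List.prefix_iff_eq_take]
  exact ⟨fun h => h.symm, fun h => h.symm⟩

-- no infix occurrence ⇒ no occurrence seen by the automaton invariant
lemma noOcc_of_not_infix (cs : List Char) (h : ¬ (['A','R','O',':'] <:+: cs)) :
    ∀ i ≤ cs.length, ¬ ['A','R','O',':'] <:+ cs.take i := by
  intro i _ hsuf
  exact h ((hsuf.isInfix).trans ((List.take_prefix i cs).isInfix))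

-- ===== VERDICT (by name: the statement is the Claim_ definition above) =====
theorem extract_aro_id_spec : Claim_equal_extract_aro_id := by
  intro header _
  unfold Spec_extract_aro_id
  unfold extract_aro_id extract_aro_id_alt
  generalize header.toList = cs
  dsimp only
  set f := PySem.Chars.find cs "ARO:".toList with hf
  have hm0 : mstate [] = 0 := by decide
  by_cases h1 : f = -1
  · rw [if_pos (by omega : f < 0)]
    have hninf : ¬ ("ARO:".toList <:+: cs) :=
      (PySem.Chars.find_eq_neg_one_iff (s := cs) (sub := "ARO:".toList)).mp (hf ▸ h1)
    have hno := noOcc_of_not_infix cs (by rwa [marker_toList] at hninf)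
    have hrun := altLoop_noOcc cs [] [] (by simpa using hno)
    rw [hm0] at hrun
    rw [hrun]
    simp
  · have h0 : 0 ≤ f := by
      have := PySem.Chars.neg_one_le_find (s := cs) (sub := "ARO:".toList); omega
    rw [if_neg (by omega : ¬ f < 0)]
    obtain ⟨hpre, hmin⟩ := PySem.Chars.find_spec (s := cs) (sub := "ARO:".toList) h0
    rw [← hf] at hpre hmin
    obtain ⟨t, ht⟩ := hpre
    have hflen : (f.toNat : Int) ≤ cs.length := by
      have := PySem.Chars.find_le_length (s := cs) (sub := "ARO:".toList)
      rw [← hf] at this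
      omega
    have hrest : cs.drop (f.toNat + 4) = t := by
      have h2 := congrArg (List.drop 4) ht
      have h3 : t = cs.drop (f.toNat + 4) := by
        simpa [List.drop_drop, show 4 + f.toNat = f.toNat + 4 by omega] using h2
      exact h3.symm
    have hlen4 : f.toNat + 4 ≤ cs.length := by
      have := congrArg List.length ht
      simp at this
      omega
    have hdrop : cs.drop f.toNat = "ARO:".toList ++ t := ht.symm
    -- the automaton run: first occurrence ends at index f.toNat + 4
    have hocc : ['A','R','O',':'] <:+ cs.take (f.toNat + 4) :=
      (occ_iff cs f.toNat hlen4).mp (by rw [← marker_toList]; exact ⟨t, ht⟩)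
    have hminS : ∀ j < f.toNat + 4, ¬ ['A','R','O',':'] <:+ cs.take j := by
      intro j hj hsuf
      have h4 : 4 ≤ j := by
        have hle1 : (4 : Nat) ≤ (cs.take j).length := hsuf.length_le
        have hle2 : (cs.take j).length ≤ j := by simp
        omega
      have hocc' : ['A','R','O',':'] <+: cs.drop (j - 4) :=
        (occ_iff cs (j - 4) (by omega)).mpr (by rwa [show j - 4 + 4 = j by omega])
      exact hmin (j - 4) (by omega) (by rwa [marker_toList])
    have hrun := altLoop_occ cs [] [] (f.toNat + 4) (by omega) hlen4
      (by simpa using hocc) (fun j hj => by simpa using hminS j hj)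
    rw [hm0] at hrun
    set tw := t.takeWhile PySem.Chars.isdigit with htw
    have hrun2 : altLoop cs 0 [] = (4, tw) := by
      rw [hrun, hrest, altLoop_digits]
      simp [htw]
    -- A's while loop and slice
    have hmlen : "ARO:".toList.length = 4 := rfl
    have htwp : tw <+: t := List.takeWhile_prefix _
    have htwtake : t.take tw.length = tw := (List.prefix_iff_eq_take.mp htwp).symm
    have hwe : aroWhileEnd cs (f.toNat + "ARO:".toList.length) = f.toNat + 4 + tw.length := by
      rw [hmlen, aroWhileEnd_eq, hrest, ← htw]
    have hfj : f = ((f.toNat : Nat) : Int) := (Int.toNat_of_nonneg h0).symm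
    have htfull : cs.take f.toNat ++ ("ARO:".toList ++ t) = cs := by
      conv_rhs => rw [← List.take_append_drop f.toNat cs]
      rw [hdrop]
    have hslice : PySem.Chars.slice cs (some f)
        (some ((aroWhileEnd cs (f.toNat + "ARO:".toList.length) : Nat) : Int))
        = "ARO:".toList ++ tw := by
      rw [hwe, hfj]
      simp only [PySem.Chars.slice_eq_listSlice]
      rw [PySem.List.slice_natCast]
      simp only [Int.toNat_natCast]
      rw [← htfull]
      have harith : f.toNat + 4 + tw.length - f.toNat = 4 + tw.length := by omega
      have hto : (cs.take f.toNat).length = f.toNat := by simp; omega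
      rw [List.drop_left' hto, harith]
      have hsplit : "ARO:".toList ++ t = ("ARO:".toList ++ t.take tw.length) ++ t.drop tw.length := by
        rw [List.append_assoc, List.take_append_drop]
      rw [hsplit, List.take_left' (by simp [htwtake]; omega), htwtake]
    rw [hslice, hrun2]
    by_cases hnil : tw = []
    · rw [hnil]
      simp
    · rw [if_neg (by simp [hnil]), if_neg (by simp [hnil])]
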